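-- pv_equiv track=rewrite | github.com/KU-MIDS-MO/assignment1-introp-25-26-HlaMyoLouis | count_digits_greater_than.py | count_digits_greater_than
-- ===== SOURCE A (Python) =====
-- def count_digits_greater_than(n, t):
--     if n < 0 or t < 0 or t > 9 or int(n) != n or int(t) != t:
--         return -1
--
--     n = int(n)
--     t = int(t)
--     count = 0
--
--     while n > 0:
--         digit = n % 10
--         if digit > t:
--             count = count + 1
--         n = (n - digit) // 10
--
--     return count
-- ===== SOURCE B (Python) =====
-- def count_digits_greater_than(n, t):
--     if n < 0 or t < 0 or t > 9 or int(n) != n or int(t) != t: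
--         return -1
--     return sum(1 for c in str(int(n)) if int(c) > t)
-- ===== Notes on version B (the rewrite author's own statement) =====
-- stated objective: idiomatic
-- what changed: B keeps the validation guard but counts the digits by iterating over the decimal string str(n) and comparing int(c) > t, instead of A's while-loop that extracts digits with % 10 and (n - digit) // 10.
import Mathlib
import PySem

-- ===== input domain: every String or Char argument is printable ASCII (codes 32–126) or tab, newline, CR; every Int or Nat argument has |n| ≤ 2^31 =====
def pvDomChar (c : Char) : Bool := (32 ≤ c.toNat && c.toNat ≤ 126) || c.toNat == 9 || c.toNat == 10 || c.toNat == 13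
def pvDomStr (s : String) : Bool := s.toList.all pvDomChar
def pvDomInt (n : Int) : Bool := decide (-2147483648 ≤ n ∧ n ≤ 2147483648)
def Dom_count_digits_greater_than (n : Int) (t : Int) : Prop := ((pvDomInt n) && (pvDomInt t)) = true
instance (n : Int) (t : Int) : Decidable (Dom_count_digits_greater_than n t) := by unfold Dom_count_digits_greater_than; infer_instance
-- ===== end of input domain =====

-- B replaces A's %10 / //10 extraction loop by counting the characters of str(n) whose digit value exceeds t (idiomatic; same cost).


-- ===== PORT A =====
-- A's while loop: digit = n % 10; count += (digit > t); n = (n - digit) // 10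
def pvALoop (n : Int) (t : Int) (count : Int) : Int :=
  if _h : n > 0 then
    let digit := PySem.Int.mod n 10
    let count' := if digit > t then count + 1 else count
    pvALoop (PySem.Int.floordiv (n - digit) 10) t count'
  else count
termination_by n.toNat
decreasing_by
  simp only [PySem.Int.mod, PySem.Int.floordiv]
  have h2 : n.fmod 10 = n % 10 := by rw [Int.fmod_eq_emod]; norm_num
  have h3 : (n - n % 10).fdiv 10 = (n - n % 10) / 10 := by rw [Int.fdiv_eq_ediv]; norm_num
  rw [h2, h3]
  omega
def count_digits_greater_than (n : Int) (t : Int) : Int :=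
  if n < 0 ∨ t < 0 ∨ t > 9 ∨ n ≠ n ∨ t ≠ t then -1
  else pvALoop n t 0

-- ===== PORT B =====
-- B: sum(1 for c in str(int(n)) if int(c) > t); pvP is the generator's filter 'int(c) > t'
def pvP (t : Int) (c : Char) : Bool := decide ((PySem.Int.ofChars? [c]).getD 0 > t)

def count_digits_greater_than_alt (n : Int) (t : Int) : Int :=
  if n < 0 ∨ t < 0 ∨ t > 9 ∨ n ≠ n ∨ t ≠ t then -1
  else ((PySem.Int.toChars n).countP (pvP t) : Int)

-- ===== PRECONDITION & SPEC =====
def Spec_count_digits_greater_than (n : Int) (t : Int) (out : Int) : Prop := out = count_digits_greater_than_alt n t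
instance (n : Int) (t : Int) (out : Int) : Decidable (Spec_count_digits_greater_than n t out) := by unfold Spec_count_digits_greater_than; infer_instance

-- ===== CLAIM (what is proved, stated in full; the proofs are below) =====
def Claim_equal_count_digits_greater_than : Prop := ∀ (n : Int) (t : Int), Dom_count_digits_greater_than n t → Spec_count_digits_greater_than n t (count_digits_greater_than n t)

-- ===== LEMMAS AND PROOFS =====

-- digits of m, most significant first (mirrors Nat.toDigits via pvToDigitsCore_eq)
def pvDigitsRev (m : Nat) : List Char :=
  if m / 10 = 0 then [(m % 10).digitChar]
  else pvDigitsRev (m / 10) ++ [(m % 10).digitChar]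
termination_by m
decreasing_by omega

lemma pvToDigitsCore_eq (fuel : Nat) : ∀ (m : Nat) (ds : List Char), m ≤ fuel →
    Nat.toDigitsCore 10 (fuel + 1) m ds = pvDigitsRev m ++ ds := by
  induction fuel with
  | zero =>
    intro m ds h
    have hm : m = 0 := Nat.le_zero.mp h
    subst hm
    simp [Nat.toDigitsCore, pvDigitsRev]
  | succ f ih =>
    intro m ds h
    rw [Nat.toDigitsCore]
    by_cases h0 : m / 10 = 0
    · simp only [h0, if_pos]
      conv_rhs => rw [pvDigitsRev]
      rw [if_pos h0]
      simp
    · simp only [h0, if_false]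
      have hlt : m / 10 ≤ f := by omega
      rw [ih (m / 10) ((m % 10).digitChar :: ds) hlt]
      conv_rhs => rw [pvDigitsRev]
      rw [if_neg h0]
      simp

lemma pvToDigits_eq (m : Nat) : Nat.toDigits 10 m = pvDigitsRev m := by
  have := pvToDigitsCore_eq m m [] le_rfl
  simpa [Nat.toDigits] using this

lemma pvOfChars_digit (d : Nat) (hd : d < 10) :
    PySem.Int.ofChars? [d.digitChar] = some (d : Int) := by
  interval_cases d <;> decide

lemma pvP_digitChar (t : Int) (d : Nat) (hd : d < 10) :
    pvP t (d.digitChar) = decide (((d : Int)) > t) := by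
  unfold pvP
  rw [pvOfChars_digit d hd, Option.getD_some]

lemma pvALoop_zero (t c : Int) : pvALoop 0 t c = c := by
  rw [pvALoop]; simp

lemma pvALoop_eq (m : Nat) : ∀ (t c : Int), 0 < m →
    pvALoop (m : Int) t c = c + ((pvDigitsRev m).countP (pvP t) : Int) := by
  induction m using Nat.strong_induction_on with
  | _ m ih =>
    intro t c hm
    rw [pvALoop]
    have hpos : (m : Int) > 0 := by exact_mod_cast hm
    rw [dif_pos hpos]
    have hmod : PySem.Int.mod (m : Int) 10 = ((m % 10 : Nat) : Int) := by
      simp only [PySem.Int.mod]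
      rw [Int.fmod_eq_emod]
      have h10 : ((if (0:Int) ≤ 10 ∨ (10:Int) ∣ (m:Int) then 0 else (10:Int))) = 0 := by
        rw [if_pos]; left; norm_num
      rw [h10]
      omega
    have hdiv : PySem.Int.floordiv ((m : Int) - ((m % 10 : Nat) : Int)) 10
        = ((m / 10 : Nat) : Int) := by
      simp only [PySem.Int.floordiv]
      rw [Int.fdiv_eq_ediv]
      have h10 : ((if (0:Int) ≤ 10 ∨ (10:Int) ∣ ((m:Int) - ((m % 10 : Nat) : Int)) then 0 else (1:Int))) = 0 := by
        rw [if_pos]; left; norm_num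
      rw [h10]
      omega
    simp only [hmod, hdiv]
    by_cases h0 : m / 10 = 0
    · rw [h0, Nat.cast_zero, pvALoop_zero]
      conv_rhs => rw [pvDigitsRev]
      rw [if_pos h0, List.countP_cons, List.countP_nil]
      rw [pvP_digitChar t (m % 10) (by omega)]
      simp only [gt_iff_lt, decide_eq_true_eq]
      push_cast
      split_ifs <;> omega
    · have hlt : m / 10 < m := by omega
      rw [ih (m / 10) hlt t _ (by omega)]
      conv_rhs => rw [pvDigitsRev]
      rw [if_neg h0, List.countP_append, List.countP_cons, List.countP_nil]
      rw [pvP_digitChar t (m % 10) (by omega)]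
      simp only [gt_iff_lt, decide_eq_true_eq]
      push_cast
      split_ifs <;> omega

-- ===== VERDICT (by name: the statement is the Claim_ definition above) =====
theorem count_digits_greater_than_spec : Claim_equal_count_digits_greater_than := by
  intro n t _
  unfold Spec_count_digits_greater_than count_digits_greater_than count_digits_greater_than_alt
  by_cases hg : n < 0 ∨ t < 0 ∨ t > 9 ∨ n ≠ n ∨ t ≠ t
  · rw [if_pos hg, if_pos hg]
  · rw [if_neg hg, if_neg hg]
    have hn : 0 ≤ n := by
      rcases lt_or_ge n 0 with h | h
      · exact absurd (Or.inl h) hg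
      · exact h
    have ht : 0 ≤ t := by
      rcases lt_or_ge t 0 with h | h
      · exact absurd (Or.inr (Or.inl h)) hg
      · exact h
    have htc : PySem.Int.toChars n = pvDigitsRev n.toNat := by
      simp only [PySem.Int.toChars]
      rw [if_neg (by omega)]
      exact pvToDigits_eq n.toNat
    rw [htc]
    rcases eq_or_lt_of_le hn with h0 | hpos
    · subst h0
      rw [pvALoop_zero]
      have h1 : pvDigitsRev (Int.toNat 0) = [Nat.digitChar 0] := by
        rw [pvDigitsRev]
        norm_num
      rw [h1, List.countP_cons, List.countP_nil]
      have h2 : pvP t (Nat.digitChar 0) = false := by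
        rw [pvP_digitChar t 0 (by norm_num)]
        simp
        omega
      rw [h2]
      simp
    · have hm : 0 < n.toNat := by omega
      have hcast : n = ((n.toNat : Nat) : Int) := by omega
      conv_lhs => rw [hcast]
      rw [pvALoop_eq n.toNat t 0 hm]
      omega
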